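-- pv_equiv track=rewrite | github.com/zainjadoon07/WordLadder | word_ladder.py | Gettransformations
-- ===== SOURCE A (Python) =====
-- def Gettransformations(word, dictionary, bannedletters=None):
--     wordlist = list(word)
--     validwords = set()  # Store valid transformations here
--
--     # Loop through each letter in the word
--     for i in range(len(word)):
--
--         originalletter = wordlist[i]
--         # Try replacing the letter with every letter from 'a' to 'z'
--         for char in "abcdefghijklmnopqrstuvwxyz":
--
--             # Skip if the new letter is the same as the original or is banned
--             if char != originalletter and (bannedletters is None or char not in bannedletters):
--                 wordlist[i] = char  # Replace the letter
--                 newword = "".join(wordlist)  # Convert the list back to a string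
--                 # Check if the new word is in the dictionary and doesn't contain banned letters
--                 if newword in dictionary and (bannedletters is None or not any(letter in newword for letter in bannedletters)):
--                     validwords.add(newword)  # Add the valid word to the set
--
--         wordlist[i] = originalletter  # Restore the original letter
--     return validwords  # Return all valid transformations
-- ===== SOURCE B (Python) =====
-- # One pass over the dictionary builds an index of the usable words keyed by their
-- # single substitution (position, letter); the answer is then read off by direct
-- # lookup instead of testing 26*len(word) generated candidates against the dictionary.
-- def Gettransformations(word, dictionary, bannedletters=None):
--     n = len(word)
--     subst = {}  # (position, substituted letter) -> the dictionary word
--     for w in dictionary: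
--         if len(w) != n:
--             continue
--         diffs = [i for i in range(n) if w[i] != word[i]]
--         if len(diffs) == 1 and (bannedletters is None
--                                 or not any(b in w for b in bannedletters)):
--             subst[diffs[0], w[diffs[0]]] = w
--     return {subst[i, c]
--             for i in range(n)
--             for c in "abcdefghijklmnopqrstuvwxyz"
--             if (i, c) in subst}
-- ===== Notes on version B (the rewrite author's own statement) =====
-- stated objective: faster
-- what changed: Instead of generating 26*len(word) substituted candidates and scanning the dictionary list for each of them, B makes one pass over the dictionary indexing the usable words (same length, Hamming distance exactly 1, no banned letter) by their substitution (position, letter), and then reads the answer off that index by direct lookup.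
import Mathlib
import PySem

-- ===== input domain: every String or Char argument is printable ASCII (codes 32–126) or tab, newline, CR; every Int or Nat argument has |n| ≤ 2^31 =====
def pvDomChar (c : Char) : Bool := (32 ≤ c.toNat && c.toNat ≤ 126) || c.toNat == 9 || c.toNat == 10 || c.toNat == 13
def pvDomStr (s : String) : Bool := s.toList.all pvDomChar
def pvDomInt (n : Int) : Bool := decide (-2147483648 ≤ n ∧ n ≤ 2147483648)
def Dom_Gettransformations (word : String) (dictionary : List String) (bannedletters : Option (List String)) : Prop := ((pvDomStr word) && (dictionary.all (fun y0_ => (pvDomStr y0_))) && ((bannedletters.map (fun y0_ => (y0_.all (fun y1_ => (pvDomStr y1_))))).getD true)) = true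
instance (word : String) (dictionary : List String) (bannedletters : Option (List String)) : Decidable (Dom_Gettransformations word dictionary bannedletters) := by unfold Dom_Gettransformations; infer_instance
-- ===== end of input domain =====

-- B replaces A's generate-26·L-candidates-and-scan-the-dictionary search by one pass
-- over the dictionary that indexes the usable words by their single substitution
-- (position, letter), then reads the answer off by direct lookup.


-- ===== PORT A =====
-- "abcdefghijklmnopqrstuvwxyz" as a list of characters (shared literal)
def pvAlphabet : List Char := "abcdefghijklmnopqrstuvwxyz".toList

-- `bannedletters is None or char not in bannedletters`
def pvNotBannedChar (bannedletters : Option (List String)) (char : Char) : Bool :=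
  match bannedletters with
  | none => true
  | some bs => !(bs.contains (String.ofList [char]))

-- `bannedletters is None or not any(letter in newword for letter in bannedletters)`
def pvNoBannedIn (bannedletters : Option (List String)) (newword : String) : Bool :=
  match bannedletters with
  | none => true
  | some bs => !(bs.any (fun letter => PySem.Str.isIn letter newword))

def Gettransformations (word : String) (dictionary : List String) (bannedletters : Option (List String)) : List String :=
  let wordlist := word.toList
  let st := (PySem.List.pyRange 0 (PySem.Str.len word) 1).foldl
    (fun (st : List Char × PySem.Set String) i =>
      let originalletter := PySem.List.pyGetD st.1 i ' '
      let st2 := pvAlphabet.foldl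
        (fun (st : List Char × PySem.Set String) char =>
          if (char != originalletter) && pvNotBannedChar bannedletters char then
            let wl := PySem.List.pySetD st.1 i char
            let newword := String.ofList wl
            if dictionary.contains newword && pvNoBannedIn bannedletters newword then
              (wl, PySem.Set.add st.2 newword)
            else (wl, st.2)
          else st) st
      (PySem.List.pySetD st2.1 i originalletter, st2.2))
    (wordlist, PySem.Set.empty)
  st.2

-- ===== PORT B =====
-- `[i for i in range(n) if w[i] != word[i]]` (only used on words of word's length)
def pvDiffs (word : String) (w : String) : List Nat :=
  (List.range word.toList.length).filter (fun j => w.toList.getD j ' ' ≠ word.toList.getD j ' ')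

-- the key `(diffs[0], w[diffs[0]])`
def pvKeyOf (word : String) (w : String) : Int × String :=
  (((pvDiffs word w).headD 0 : Int), String.ofList [w.toList.getD ((pvDiffs word w).headD 0) ' '])

def Gettransformations_alt (word : String) (dictionary : List String) (bannedletters : Option (List String)) : List String :=
  let n := word.toList.length
  let subst := dictionary.foldl
    (fun (d : PySem.Dict (Int × String) String) w =>
      if w.toList.length ≠ n then d
      else if ((pvDiffs word w).length == 1) && pvNoBannedIn bannedletters w then
        d.insert (pvKeyOf word w) w
      else d)
    PySem.Dict.empty
  PySem.Set.ofList ((List.range n).flatMap (fun (i : Nat) =>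
    pvAlphabet.filterMap (fun c => subst.get? ((i : Int), String.ofList [c]))))

-- ===== PRECONDITION & SPEC =====
def Spec_Gettransformations (word : String) (dictionary : List String) (bannedletters : Option (List String)) (out : List String) : Prop := out = Gettransformations_alt word dictionary bannedletters
instance (word : String) (dictionary : List String) (bannedletters : Option (List String)) (out : List String) : Decidable (Spec_Gettransformations word dictionary bannedletters out) := by unfold Spec_Gettransformations; infer_instance

-- ===== CLAIM (what is proved, stated in full; the proofs are below) =====
def Claim_equal_Gettransformations : Prop := ∀ (word : String) (dictionary : List String) (bannedletters : Option (List String)), Dom_Gettransformations word dictionary bannedletters → Spec_Gettransformations word dictionary bannedletters (Gettransformations word dictionary bannedletters)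

-- ===== LEMMAS AND PROOFS =====

-- the word with position i replaced by c (A's `newword`, B's indexed word)
def pvCand (word : String) (i : Nat) (c : Char) : String := String.ofList (word.toList.set i c)

-- A's full test for the candidate built at position i from letter c
def pvCondA (word : String) (dictionary : List String) (bl : Option (List String)) (i : Nat) (c : Char) : Bool :=
  ((c != word.toList.getD i ' ') && pvNotBannedChar bl c) &&
  ((dictionary.contains (pvCand word i c)) && pvNoBannedIn bl (pvCand word i c))

-- all accepted candidates, in A's generation order (position, then letter)
def pvCands (word : String) (dictionary : List String) (bl : Option (List String)) : List String :=
  (List.range word.toList.length).flatMap (fun i =>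
    (pvAlphabet.filter (fun c => pvCondA word dictionary bl i c)).map (fun c => pvCand word i c))

lemma pvFoldl_fixed_fst {α β γ : Type} (l : List γ) (step : α × β → γ → α × β) (g : β → γ → β)
    (a : α) (h : ∀ s i, i ∈ l → step (a, s) i = (a, g s i)) :
    ∀ s, l.foldl step (a, s) = (a, l.foldl g s) := by
  induction l with
  | nil => intro s; rfl
  | cons x xs ih =>
    intro s
    simp only [List.foldl_cons, h s x (by simp)]
    exact ih (fun s i hi => h s i (by simp [hi])) _

lemma pvInner_loop (word : String) (dictionary : List String) (bl : Option (List String))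
    (i : Nat) :
    ∀ (cs : List Char) (d : Char) (s : PySem.Set String),
      ∃ d', cs.foldl
        (fun (st : List Char × PySem.Set String) char =>
          if (char != word.toList.getD i ' ') && pvNotBannedChar bl char then
            if dictionary.contains (String.ofList (st.1.set i char)) &&
               pvNoBannedIn bl (String.ofList (st.1.set i char)) then
              (st.1.set i char, PySem.Set.add st.2 (String.ofList (st.1.set i char)))
            else (st.1.set i char, st.2)
          else st)
        (word.toList.set i d, s)
      = (word.toList.set i d',
         cs.foldl (fun s c => if pvCondA word dictionary bl i c then PySem.Set.add s (pvCand word i c) else s) s) := by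
  intro cs
  induction cs with
  | nil => intro d s; exact ⟨d, rfl⟩
  | cons c cs ih =>
    intro d s
    simp only [List.foldl_cons, List.set_set]
    by_cases h1 : ((c != word.toList.getD i ' ') && pvNotBannedChar bl c) = true
    · rw [if_pos h1]
      by_cases h2 : (dictionary.contains (String.ofList (word.toList.set i c)) &&
          pvNoBannedIn bl (String.ofList (word.toList.set i c))) = true
      · rw [if_pos h2]
        have hcond : pvCondA word dictionary bl i c = true := by
          simp only [pvCondA, pvCand, h1, h2, Bool.and_self]
        rw [hcond, if_pos rfl]
        have := ih c (PySem.Set.add s (pvCand word i c))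
        simpa [pvCand] using this
      · rw [if_neg h2]
        have hcond : pvCondA word dictionary bl i c = false := by
          have hx : (dictionary.contains (String.ofList (word.toList.set i c)) &&
              pvNoBannedIn bl (String.ofList (word.toList.set i c))) = false :=
            Bool.eq_false_iff.mpr h2
          rw [pvCondA, pvCand, hx, Bool.and_false]
        rw [hcond]
        simp only [Bool.false_eq_true, if_false]
        exact ih c s
    · rw [if_neg h1]
      have hcond : pvCondA word dictionary bl i c = false := by
        have hx : ((c != word.toList.getD i ' ') && pvNotBannedChar bl c) = false :=
          Bool.eq_false_iff.mpr h1
        rw [pvCondA, hx, Bool.false_and]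
      rw [hcond]
      simp only [Bool.false_eq_true, if_false]
      exact ih d s

lemma pvA_eq (word : String) (dictionary : List String) (bl : Option (List String)) :
    Gettransformations word dictionary bl = PySem.Set.ofList (pvCands word dictionary bl) := by
  have hlen : PySem.Str.len word = (word.toList.length : Int) := by
    simp [PySem.Str.len]
  rw [Gettransformations]
  simp only [hlen, PySem.List.pyRange_zero_nat, List.foldl_map,
    PySem.List.pyGetD_natCast, PySem.List.pySetD_natCast]
  rw [pvFoldl_fixed_fst (a := word.toList)
      (g := fun s i => pvAlphabet.foldl
        (fun s c => if pvCondA word dictionary bl i c then PySem.Set.add s (pvCand word i c) else s) s)]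
  · show _ = PySem.Set.ofList (pvCands word dictionary bl)
    rw [PySem.Set.ofList_eq_foldl, pvCands, List.foldl_flatMap]
    apply PySem.List.foldl_congr_mem
    intro s i _
    rw [List.foldl_map, ← PySem.List.foldl_if_eq_foldl_filter
      (p := fun c => pvCondA word dictionary bl i c)
      (f := fun s c => PySem.Set.add s (pvCand word i c))]
  · intro s i hi
    have hi' : i < word.toList.length := List.mem_range.mp hi
    have hset : word.toList.set i (word.toList.getD i ' ') = word.toList := by
      rw [List.getD_eq_getElem _ _ hi', List.set_getElem_self]
    obtain ⟨d', hd'⟩ := pvInner_loop word dictionary bl i pvAlphabet (word.toList.getD i ' ') s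
    rw [hset] at hd'
    rw [hd', List.set_set, hset]

lemma pvFilter_range_eq_singleton {p : Nat → Bool} {n i : Nat} (hi : i < n) (hpi : p i = true)
    (hothers : ∀ j, j < n → j ≠ i → p j = false) : (List.range n).filter p = [i] := by
  induction n with
  | zero => omega
  | succ m ih =>
    rw [List.range_succ, List.filter_append]
    by_cases him : i = m
    · subst him
      have h1 : (List.range i).filter p = [] := by
        rw [List.filter_eq_nil_iff]
        intro j hj
        simp only [List.mem_range] at hj
        simp [hothers j (by omega) (by omega)]
      simp [h1, hpi]
    · have h2 : p m = false := hothers m (by omega) (by omega)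
      rw [ih (by omega) (fun j hj hji => hothers j (by omega) hji)]
      simp [h2]

lemma pvDiffs_cand {word : String} {i : Nat} {c : Char} (hi : i < word.toList.length)
    (hc : c ≠ word.toList.getD i ' ') :
    pvDiffs word (pvCand word i c) = [i] := by
  rw [pvDiffs, pvCand]
  simp only [String.toList_ofList]
  apply pvFilter_range_eq_singleton hi
  · simp only [decide_eq_true_eq]
    have h1 : (word.toList.set i c).getD i ' ' = c := by
      rw [List.getD_eq_getElem _ _ (by simpa using hi)]
      exact List.getElem_set_self _
    rw [h1]
    exact hc
  · intro j hj hji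
    simp only [decide_eq_false_iff_not, not_not]
    rw [List.getD_eq_getElem _ _ (by simpa using hj), List.getD_eq_getElem _ _ hj]
    exact List.getElem_set_ne (by omega) _

lemma pvSingleton_infix {c : Char} {l : List Char} (h : c ∈ l) : [c] <:+: l := by
  obtain ⟨s, t, rfl⟩ := List.append_of_mem h
  exact ⟨s, t, by simp⟩

-- if the substituted letter c itself is a banned string, the whole-word ban check fails
lemma pvNotBannedChar_of_noBannedIn {bl : Option (List String)} {w : String} {c : Char}
    (hc : c ∈ w.toList) (h : pvNoBannedIn bl w = true) : pvNotBannedChar bl c = true := by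
  cases bl with
  | none => rfl
  | some bs =>
    simp only [pvNotBannedChar, Bool.not_eq_eq_eq_not, Bool.not_true, List.contains_eq_mem,
      decide_eq_false_iff_not]
    intro hcbs
    have hinfix : PySem.Str.isIn (String.ofList [c]) w = true := by
      rw [PySem.Str.isIn_iff_infix, String.toList_ofList]
      exact pvSingleton_infix hc
    simp only [pvNoBannedIn, Bool.not_eq_eq_eq_not, Bool.not_true, List.any_eq_false] at h
    exact (h _ hcbs) hinfix

-- B's per-word acceptance test (length already checked)
def pvGoodB (word : String) (bl : Option (List String)) (w : String) : Bool :=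
  decide (¬ w.toList.length ≠ word.toList.length) &&
  (((pvDiffs word w).length == 1) && pvNoBannedIn bl w)

-- an accepted word is determined by its key: it IS word with that one substitution
lemma pvGood_eq_cand {word w : String} {bl : Option (List String)} {i : Nat} {c : Char}
    (hg : pvGoodB word bl w = true) (hk : pvKeyOf word w = ((i : Int), String.ofList [c])) :
    i < word.toList.length ∧ c ≠ word.toList.getD i ' ' ∧ w = pvCand word i c := by
  simp only [pvGoodB, Bool.and_eq_true, decide_eq_true_eq, not_not, beq_iff_eq] at hg
  obtain ⟨hlen, hd1, _⟩ := hg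
  obtain ⟨j, hdj⟩ := List.length_eq_one_iff.mp hd1
  have hkey := hk
  rw [pvKeyOf, hdj, List.headD_cons] at hkey
  have hji : j = i := by
    have := congrArg Prod.fst hkey
    simpa using this
  subst hji
  have hcw : w.toList.getD j ' ' = c := by
    have := congrArg Prod.snd hkey
    simp only at this
    have := congrArg String.toList this
    simpa using this
  have hjmem : j ∈ pvDiffs word w := by rw [hdj]; simp
  rw [pvDiffs, List.mem_filter, List.mem_range] at hjmem
  obtain ⟨hjn, hpj⟩ := hjmem
  have hcne : c ≠ word.toList.getD j ' ' := by
    rw [← hcw]; simpa using hpj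
  refine ⟨hjn, hcne, ?_⟩
  have hothers : ∀ k, k < word.toList.length → k ≠ j →
      w.toList.getD k ' ' = word.toList.getD k ' ' := by
    intro k hkn hkj
    by_contra hne
    have hkmem : k ∈ pvDiffs word w := by
      rw [pvDiffs, List.mem_filter, List.mem_range]
      exact ⟨hkn, by simpa using hne⟩
    rw [hdj] at hkmem
    simp only [List.mem_singleton] at hkmem
    exact hkj hkmem
  rw [pvCand]
  conv_lhs => rw [← String.ofList_toList (s := w)]
  congr 1
  apply List.ext_getElem (by simpa using hlen)
  intro k h1 h2
  by_cases hkj : k = j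
  · subst hkj
    rw [List.getElem_set_self _, ← hcw, List.getD_eq_getElem _ _ h1]
  · rw [List.getElem_set_ne (by omega) _]
    have := hothers k (by simpa using h2) hkj
    rw [List.getD_eq_getElem _ _ h1, List.getD_eq_getElem _ _ (by simpa using h2)] at this
    exact this

-- conversely, an accepted candidate passes B's test with exactly that key
lemma pvGood_cand {word : String} {bl : Option (List String)} {i : Nat} {c : Char}
    (hi : i < word.toList.length) (hc : c ≠ word.toList.getD i ' ')
    (hbn : pvNoBannedIn bl (pvCand word i c) = true) :
    pvGoodB word bl (pvCand word i c) = true ∧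
    pvKeyOf word (pvCand word i c) = ((i : Int), String.ofList [c]) := by
  have hdiffs := pvDiffs_cand hi hc
  have hget : (pvCand word i c).toList.getD i ' ' = c := by
    rw [pvCand, String.toList_ofList, List.getD_eq_getElem _ _ (by simpa using hi)]
    exact List.getElem_set_self _
  constructor
  · simp only [pvGoodB, Bool.and_eq_true, decide_eq_true_eq, not_not, beq_iff_eq]
    refine ⟨by simp [pvCand], by rw [hdiffs]; rfl, hbn⟩
  · rw [pvKeyOf, hdiffs, List.headD_cons, hget]

-- the index lookup after the whole dictionary pass
lemma pvGet_foldl_insert (word : String) (bl : Option (List String)) (k : Int × String)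
    (v : String) :
    ∀ (l : List String) (d : PySem.Dict (Int × String) String),
      (∀ w ∈ l, pvGoodB word bl w = true → pvKeyOf word w = k → w = v) →
      (l.foldl (fun d w =>
        if w.toList.length ≠ word.toList.length then d
        else if ((pvDiffs word w).length == 1) && pvNoBannedIn bl w then
          d.insert (pvKeyOf word w) w
        else d) d).get? k
      = if l.any (fun w => pvGoodB word bl w && (pvKeyOf word w == k)) then some v
        else d.get? k := by
  intro l
  induction l with
  | nil => intro d _; simp
  | cons w l ih =>
    intro d hmem
    simp only [List.foldl_cons, List.any_cons]
    have ihd := fun d => ih d (fun w' hw' => hmem w' (List.mem_cons_of_mem _ hw'))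
    by_cases hg : pvGoodB word bl w = true
    · have hg' := hg
      simp only [pvGoodB, Bool.and_eq_true, decide_eq_true_eq] at hg'
      rw [if_neg hg'.1, if_pos (by simp [hg'.2.1, hg'.2.2]), ihd _]
      by_cases hk : pvKeyOf word w = k
      · have hwv : w = v := hmem w (List.mem_cons_self) hg hk
        have hfirst : (pvGoodB word bl w && (pvKeyOf word w == k)) = true := by
          simp [hg, hk]
        by_cases hrest : (l.any fun w => pvGoodB word bl w && (pvKeyOf word w == k)) = true
        · simp [hfirst, hrest]
        · rw [if_neg hrest, if_pos (by simp [hfirst]), hk, PySem.Dict.get?_insert_self, hwv]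
      · have hfirst : (pvGoodB word bl w && (pvKeyOf word w == k)) = false := by
          simp [hk]
        simp only [hfirst, Bool.false_or]
        rw [show (d.insert (pvKeyOf word w) w).get? k = d.get? k from
            PySem.Dict.get?_insert_of_ne d w (Ne.symm hk)]
    · have hgf : pvGoodB word bl w = false := Bool.eq_false_iff.mpr hg
      have step_eq : (if w.toList.length ≠ word.toList.length then d
          else if ((pvDiffs word w).length == 1) && pvNoBannedIn bl w then
            d.insert (pvKeyOf word w) w else d) = d := by
        by_cases hl : w.toList.length ≠ word.toList.length
        · rw [if_pos hl]
        · rw [if_neg hl, if_neg]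
          intro hacc
          exact hg (by
            simp only [pvGoodB, Bool.and_eq_true, decide_eq_true_eq]
            exact ⟨hl, by simpa using hacc⟩)
      rw [step_eq, ihd d]
      simp [hgf]

-- `filterMap (if p then some ∘ g else none)` is `map g ∘ filter p`
lemma pvFilterMap_if {α β : Type} (p : α → Bool) (g : α → β) (l : List α) :
    l.filterMap (fun a => if p a then some (g a) else none) = (l.filter p).map g := by
  induction l with
  | nil => rfl
  | cons x xs ih =>
    by_cases h : p x = true
    · simp [h, ih]
    · simp [h, ih]

lemma pvSubst_get (word : String) (dictionary : List String) (bl : Option (List String))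
    {i : Nat} {c : Char} (hi : i < word.toList.length) :
    (dictionary.foldl (fun d w =>
        if w.toList.length ≠ word.toList.length then d
        else if ((pvDiffs word w).length == 1) && pvNoBannedIn bl w then
          d.insert (pvKeyOf word w) w
        else d) PySem.Dict.empty).get? ((i : Int), String.ofList [c])
    = if pvCondA word dictionary bl i c then some (pvCand word i c) else none := by
  have hval : ∀ w, pvGoodB word bl w = true →
      pvKeyOf word w = ((i : Int), String.ofList [c]) → w = pvCand word i c :=
    fun w hg hk => (pvGood_eq_cand hg hk).2.2
  rw [pvGet_foldl_insert word bl _ (pvCand word i c) dictionary PySem.Dict.empty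
      (fun w _ => hval w), PySem.Dict.get?_empty]
  congr 1
  rw [List.any_eq_true]
  apply propext
  constructor
  · rintro ⟨w, hwmem, hw⟩
    simp only [Bool.and_eq_true, beq_iff_eq] at hw
    obtain ⟨hg, hk⟩ := hw
    obtain ⟨_, hcne, hwc⟩ := pvGood_eq_cand hg hk
    subst hwc
    simp only [pvGoodB, Bool.and_eq_true] at hg
    have hbn : pvNoBannedIn bl (pvCand word i c) = true := hg.2.2
    have hcmem : c ∈ (pvCand word i c).toList := by
      rw [pvCand, String.toList_ofList]
      have hlt : i < (word.toList.set i c).length := by simpa using hi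
      have hval' : (word.toList.set i c)[i]'hlt = c := List.getElem_set_self _
      have hmem' := List.getElem_mem hlt
      rwa [hval'] at hmem'
    have hnb : pvNotBannedChar bl c = true := pvNotBannedChar_of_noBannedIn hcmem hbn
    simp only [pvCondA, Bool.and_eq_true, bne_iff_ne, ne_eq]
    exact ⟨⟨hcne, hnb⟩, by simpa using hwmem, hbn⟩
  · intro hcond
    have hcond' := hcond
    simp only [pvCondA, Bool.and_eq_true, bne_iff_ne, ne_eq] at hcond'
    obtain ⟨⟨hne, _⟩, hmem, hbn⟩ := hcond'
    obtain ⟨hgood, hkey⟩ := pvGood_cand hi hne hbn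
    exact ⟨pvCand word i c, by simpa using hmem, by simp [hgood, hkey]⟩

lemma pvB_eq (word : String) (dictionary : List String) (bl : Option (List String)) :
    Gettransformations_alt word dictionary bl = PySem.Set.ofList (pvCands word dictionary bl) := by
  rw [Gettransformations_alt, pvCands]
  congr 1
  apply List.flatMap_congr
  intro i hi
  have hi' : i < word.toList.length := List.mem_range.mp hi
  have hfun : ∀ c ∈ pvAlphabet,
      (dictionary.foldl (fun d w =>
          if w.toList.length ≠ word.toList.length then d
          else if ((pvDiffs word w).length == 1) && pvNoBannedIn bl w then
            d.insert (pvKeyOf word w) w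
          else d) PySem.Dict.empty).get? ((i : Int), String.ofList [c])
      = if pvCondA word dictionary bl i c then some (pvCand word i c) else none :=
    fun c _ => pvSubst_get word dictionary bl hi'
  rw [List.filterMap_congr hfun, pvFilterMap_if]

-- ===== VERDICT (by name: the statement is the Claim_ definition above) =====
theorem Gettransformations_spec : Claim_equal_Gettransformations := by
  intro word dictionary bannedletters _
  show Gettransformations word dictionary bannedletters = Gettransformations_alt word dictionary bannedletters
  rw [pvA_eq, pvB_eq]
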